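-- pv_equiv track=rewrite | github.com/tuuhigh/airline_crawlers | src/ak/crawler_zenrow_xhr.py | fix_json_string
-- ===== SOURCE A (Python) =====
-- def fix_json_string(data):
--     # Split the string into parts by commas and brackets
--     parts = data.replace('{', '{ ').replace('}', ' }').replace('[', '[ ').replace(']', ' ]').split()
--
--     # Initialize an empty list for the fixed parts
--     fixed_parts = []
--
--     for part in parts:
--         # Add quotes around keys
--         if ':' in part:
--             key_value = part.split(':', 1)
--             key = key_value[0].strip()
--             value = key_value[1].strip()
--             fixed_parts.append(f'"{key}": {value}')
--         else:
--             fixed_parts.append(part)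
--
--     # Join the fixed parts back into a string
--     return ' '.join(fixed_parts)
-- ===== SOURCE B (Python) =====
-- def fix_json_string(data):
--     # One-pass tokenizer (boundaries: whitespace, after '{'/'[', before '}'/']'),
--     # then quote keys via partition at the first ':'.
--     tokens = []
--     cur = []
--     for ch in data:
--         if ch.isspace():
--             if cur:
--                 tokens.append(''.join(cur))
--                 cur = []
--         elif ch in '{[':
--             cur.append(ch)
--             tokens.append(''.join(cur))
--             cur = []
--         elif ch in '}]':
--             if cur:
--                 tokens.append(''.join(cur))
--             cur = [ch]
--         else:
--             cur.append(ch)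
--     if cur:
--         tokens.append(''.join(cur))
--     out = []
--     for t in tokens:
--         head, sep, tail = t.partition(':')
--         out.append(f'"{head}": {tail}' if sep else t)
--     return ' '.join(out)
-- ===== Notes on version B (the rewrite author's own statement) =====
-- stated objective: alternative
-- what changed: Replaces A's four whole-string replace() passes + split() + per-token membership-test/first-colon-split/strip() by a single-pass character tokenizer with an explicit (tokens, current-chunk) state and partition-based key quoting.
import Mathlib
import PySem

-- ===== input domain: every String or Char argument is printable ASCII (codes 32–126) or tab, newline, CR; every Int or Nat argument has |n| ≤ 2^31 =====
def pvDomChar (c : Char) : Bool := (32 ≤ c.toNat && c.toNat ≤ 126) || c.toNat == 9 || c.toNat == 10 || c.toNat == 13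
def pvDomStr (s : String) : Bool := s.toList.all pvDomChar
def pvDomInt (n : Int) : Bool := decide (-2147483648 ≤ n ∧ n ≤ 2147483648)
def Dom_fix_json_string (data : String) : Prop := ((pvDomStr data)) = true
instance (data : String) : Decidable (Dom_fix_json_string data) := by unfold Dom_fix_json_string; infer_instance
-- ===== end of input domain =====

-- B replaces A's four-replace + split() preprocessing by a single-pass character tokenizer,
-- and A's membership test + split(':', 1) + strip per token by str.partition; alternative algorithm, same result.

-- ===== PORT A =====
def pvFixPartA (part : String) : String :=
  if PySem.Str.isIn ":" part then
    let kv := (PySem.Str.splitMax? part ":" 1).getD []   -- part.split(':', 1); sep ":" is nonempty so never none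
    let key := PySem.Str.strip (PySem.List.pyGetD kv 0 "")
    let value := PySem.Str.strip (PySem.List.pyGetD kv 1 "")
    String.ofList ('"' :: key.toList ++ '"' :: ':' :: ' ' :: value.toList)  -- f'"{key}": {value}', exact on chars
  else part

def fix_json_string (data : String) : String :=
  let parts := PySem.Str.split₀ (PySem.Str.replace (PySem.Str.replace (PySem.Str.replace (PySem.Str.replace data "{" "{ ") "}" " }") "[" "[ ") "]" " ]")
  let fixed_parts := parts.foldl (fun acc part => acc ++ [pvFixPartA part]) []
  PySem.Str.join " " fixed_parts

-- ===== PORT B =====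
-- loop body of B's tokenizer: state = (tokens so far, current chunk)
def pvStepB (st : List String × List Char) (ch : Char) : List String × List Char :=
  if PySem.Chars.isspace ch then             -- ch.isspace()
    (if st.2.isEmpty then st else (st.1 ++ [String.ofList st.2], []))
  else if ch = '{' ∨ ch = '[' then           -- ch in '{['
    (st.1 ++ [String.ofList (st.2 ++ [ch])], [])
  else if ch = '}' ∨ ch = ']' then           -- ch in '}]'
    ((if st.2.isEmpty then st.1 else st.1 ++ [String.ofList st.2]), [ch])
  else (st.1, st.2 ++ [ch])

def pvQuoteB (t : String) : String :=
  -- t.partition(':') ported by hand (exact): head/tail around the FIRST ':'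
  let head := t.toList.takeWhile (fun c => c ≠ ':')
  match t.toList.dropWhile (fun c => c ≠ ':') with
  | [] => t
  | _ :: tail => String.ofList ('"' :: head ++ '"' :: ':' :: ' ' :: tail)

def fix_json_string_alt (data : String) : String :=
  let st := data.toList.foldl pvStepB ([], [])
  let tokens := if st.2.isEmpty then st.1 else st.1 ++ [String.ofList st.2]
  PySem.Str.join " " (tokens.foldl (fun out t => out ++ [pvQuoteB t]) [])

-- ===== PRECONDITION & SPEC =====
def Spec_fix_json_string (data : String) (out : String) : Prop := out = fix_json_string_alt data
instance (data : String) (out : String) : Decidable (Spec_fix_json_string data out) := by unfold Spec_fix_json_string; infer_instance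

-- ===== CLAIM (what is proved, stated in full; the proofs are below) =====
def Claim_equal_fix_json_string : Prop := ∀ (data : String), Dom_fix_json_string data → Spec_fix_json_string data (fix_json_string data)

-- ===== LEMMAS AND PROOFS =====

-- per-character expansion performed by A's four single-character replaces
def pvExp (c : Char) : List Char :=
  if c = '{' then ['{', ' '] else if c = '}' then [' ', '}']
  else if c = '[' then ['[', ' '] else if c = ']' then [' ', ']'] else [c]

-- char-list mirror of pvStepB
def pvStepC (st : List (List Char) × List Char) (ch : Char) : List (List Char) × List Char :=
  if PySem.Chars.isspace ch then
    (if st.2.isEmpty then st else (st.1 ++ [st.2], []))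
  else if ch = '{' ∨ ch = '[' then
    (st.1 ++ [st.2 ++ [ch]], [])
  else if ch = '}' ∨ ch = ']' then
    ((if st.2.isEmpty then st.1 else st.1 ++ [st.2]), [ch])
  else (st.1, st.2 ++ [ch])

def pvFinC (st : List (List Char) × List Char) : List (List Char) :=
  if st.2.isEmpty then st.1 else st.1 ++ [st.2]

theorem pv_replace_go (a : Char) (new : List Char) :
    ∀ (l acc : List Char) (fuel : Nat), l.length ≤ fuel →
      PySem.Chars.replace.go [a] new fuel l acc
        = acc.reverse ++ l.flatMap (fun c => if c = a then new else [c]) := by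
  intro l
  induction l with
  | nil =>
    intro acc fuel _
    cases fuel <;> simp [PySem.Chars.replace.go]
  | cons c t ih =>
    intro acc fuel hf
    cases fuel with
    | zero => simp at hf
    | succ n =>
      have ht : t.length ≤ n := by simpa using hf
      by_cases hc : c = a
      · subst hc
        rw [PySem.Chars.replace.go]
        simp [List.isPrefixOf, ih (new.reverse ++ acc) n ht]
      · rw [PySem.Chars.replace.go]
        simp [List.isPrefixOf, hc, ih (c :: acc) n ht]
        exact fun h => absurd h.symm hc

theorem pv_replace_single (l : List Char) (a : Char) (new : List Char) :
    PySem.Chars.replace l [a] new = l.flatMap (fun c => if c = a then new else [c]) := by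
  rw [PySem.Chars.replace]
  simp [pv_replace_go a new l [] l.length le_rfl]

theorem pv_chain (l : List Char) :
    PySem.Chars.replace
        (PySem.Chars.replace
          (PySem.Chars.replace
            (PySem.Chars.replace l ['{'] ['{',' '])
            ['}'] [' ','}'])
          ['['] ['[',' '])
        [']'] [' ',']']
      = l.flatMap pvExp := by
  simp only [pv_replace_single]
  induction l with
  | nil => rfl
  | cons c t ih =>
    simp only [List.flatMap_cons, List.flatMap_append, ih]
    congr 1
    by_cases h1 : c = '{'
    · subst h1; rfl
    by_cases h2 : c = '}'
    · subst h2; rfl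
    by_cases h3 : c = '['
    · subst h3; rfl
    by_cases h4 : c = ']'
    · subst h4; rfl
    simp [pvExp, h1, h2, h3, h4]

theorem pv_go_nil (cur : List Char) (acc : List (List Char)) :
    PySem.Chars.split₀.go [] cur acc
      = if cur.isEmpty then acc.reverse else (cur.reverse :: acc).reverse := by
  rw [PySem.Chars.split₀.go.eq_def]

theorem pv_go_space (c : Char) (rest cur : List Char) (acc : List (List Char))
    (h : PySem.Chars.isspace c = true) :
    PySem.Chars.split₀.go (c :: rest) cur acc
      = if cur.isEmpty then PySem.Chars.split₀.go rest [] acc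
        else PySem.Chars.split₀.go rest [] (cur.reverse :: acc) := by
  rw [PySem.Chars.split₀.go.eq_def]; simp [h]

theorem pv_go_nonspace (c : Char) (rest cur : List Char) (acc : List (List Char))
    (h : PySem.Chars.isspace c = false) :
    PySem.Chars.split₀.go (c :: rest) cur acc
      = PySem.Chars.split₀.go rest (c :: cur) acc := by
  rw [PySem.Chars.split₀.go.eq_def]; simp [h]

theorem pv_split_go (cs : List Char) :
    ∀ (cur : List Char) (toks : List (List Char)),
      PySem.Chars.split₀.go (cs.flatMap pvExp) cur toks
        = pvFinC (cs.foldl pvStepC (toks.reverse, cur.reverse)) := by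
  induction cs with
  | nil =>
    intro cur toks
    cases cur <;> simp [pv_go_nil, pvFinC]
  | cons c cs ih =>
    intro cur toks
    simp only [List.flatMap_cons, List.foldl_cons]
    by_cases h1 : c = '{'
    · subst h1
      rw [show pvExp '{' = ['{',' '] from rfl, List.cons_append, List.cons_append,
        pv_go_nonspace _ _ _ _ (by decide), pv_go_space _ _ _ _ (by decide)]
      simp only [List.isEmpty_cons, Bool.false_eq_true, if_false, List.nil_append, ih]
      simp [pvStepC, show PySem.Chars.isspace '{' = false from by decide]
    · by_cases h3 : c = '['
      · subst h3
        rw [show pvExp '[' = ['[',' '] from rfl, List.cons_append, List.cons_append,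
          pv_go_nonspace _ _ _ _ (by decide), pv_go_space _ _ _ _ (by decide)]
        simp only [List.isEmpty_cons, Bool.false_eq_true, if_false, List.nil_append, ih]
        simp [pvStepC, show PySem.Chars.isspace '[' = false from by decide]
      · by_cases h2 : c = '}'
        · subst h2
          rw [show pvExp '}' = [' ','}'] from rfl, List.cons_append, List.cons_append,
            pv_go_space _ _ _ _ (by decide)]
          by_cases hcur : cur.isEmpty
          · rw [if_pos hcur, pv_go_nonspace _ _ _ _ (by decide), List.nil_append, ih]
            have : cur = [] := List.isEmpty_iff.mp hcur
            subst this
            simp [pvStepC, show PySem.Chars.isspace '}' = false from by decide, pvFinC]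
          · rw [if_neg hcur, pv_go_nonspace _ _ _ _ (by decide), List.nil_append, ih]
            simp only [pvStepC, show PySem.Chars.isspace '}' = false from by decide,
              Bool.false_eq_true, if_false]
            simp [List.isEmpty_reverse, hcur]
        · by_cases h4 : c = ']'
          · subst h4
            rw [show pvExp ']' = [' ',']'] from rfl, List.cons_append, List.cons_append,
              pv_go_space _ _ _ _ (by decide)]
            by_cases hcur : cur.isEmpty
            · rw [if_pos hcur, pv_go_nonspace _ _ _ _ (by decide), List.nil_append, ih]
              have : cur = [] := List.isEmpty_iff.mp hcur
              subst this
              simp [pvStepC, show PySem.Chars.isspace ']' = false from by decide, pvFinC]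
            · rw [if_neg hcur, pv_go_nonspace _ _ _ _ (by decide), List.nil_append, ih]
              simp only [pvStepC, show PySem.Chars.isspace ']' = false from by decide,
                Bool.false_eq_true, if_false]
              simp [List.isEmpty_reverse, hcur]
          · have hexp : pvExp c = [c] := by simp [pvExp, h1, h2, h3, h4]
            rw [hexp, List.singleton_append]
            by_cases hs : PySem.Chars.isspace c
            · rw [pv_go_space _ _ _ _ hs]
              by_cases hcur : cur.isEmpty
              · rw [if_pos hcur, ih]
                have : cur = [] := List.isEmpty_iff.mp hcur
                subst this
                simp [pvStepC, hs]
              · rw [if_neg hcur, ih]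
                simp [pvStepC, hs, List.isEmpty_reverse, hcur]
            · rw [pv_go_nonspace _ _ _ _ (by simpa using hs), ih]
              simp [pvStepC, hs, h1, h2, h3, h4]

theorem pv_stepB_stepC (cs : List Char) :
    ∀ (ts : List (List Char)) (cur : List Char),
      cs.foldl pvStepB (ts.map String.ofList, cur)
        = ((cs.foldl pvStepC (ts, cur)).1.map String.ofList, (cs.foldl pvStepC (ts, cur)).2) := by
  induction cs with
  | nil => intro ts cur; rfl
  | cons c cs ih =>
    intro ts cur
    simp only [List.foldl_cons]
    have hstep : pvStepB (ts.map String.ofList, cur) c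
        = ((pvStepC (ts, cur) c).1.map String.ofList, (pvStepC (ts, cur) c).2) := by
      simp only [pvStepB, pvStepC]
      split_ifs <;> simp
    rw [hstep]
    exact ih _ _

theorem pv_split_tokens (cs : List Char) :
    ∀ (cur : List Char) (toks : List (List Char)),
      (∀ t ∈ toks, t ≠ [] ∧ ∀ ch ∈ t, PySem.Chars.isspace ch = false) →
      (∀ ch ∈ cur, PySem.Chars.isspace ch = false) →
      ∀ t ∈ PySem.Chars.split₀.go cs cur toks, t ≠ [] ∧ ∀ ch ∈ t, PySem.Chars.isspace ch = false := by
  induction cs with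
  | nil =>
    intro cur toks htoks hcur t ht
    rw [pv_go_nil] at ht
    by_cases h : cur.isEmpty
    · rw [if_pos h] at ht
      exact htoks t (by simpa using ht)
    · rw [if_neg h] at ht
      simp only [List.mem_reverse, List.mem_cons] at ht
      rcases ht with rfl | ht
      · refine ⟨by simpa [List.isEmpty_iff] using h, ?_⟩
        intro ch hch
        exact hcur ch (by simpa using hch)
      · exact htoks t ht
  | cons c cs ih =>
    intro cur toks htoks hcur t ht
    by_cases hs : PySem.Chars.isspace c
    · rw [pv_go_space _ _ _ _ hs] at ht
      by_cases h : cur.isEmpty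
      · rw [if_pos h] at ht
        exact ih [] toks htoks (by simp) t ht
      · rw [if_neg h] at ht
        refine ih [] (cur.reverse :: toks) ?_ (by simp) t ht
        intro u hu
        rcases List.mem_cons.mp hu with rfl | hu
        · exact ⟨by simpa [List.isEmpty_iff] using h, fun ch hch => hcur ch (by simpa using hch)⟩
        · exact htoks u hu
    · rw [pv_go_nonspace _ _ _ _ (by simpa using hs)] at ht
      refine ih (c :: cur) toks htoks ?_ t ht
      intro ch hch
      rcases List.mem_cons.mp hch with rfl | hch
      · simpa using hs
      · exact hcur ch hch

theorem pv_sm_go_m0 (fuel : Nat) (l cur : List Char) (acc : List (List Char)) :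
    PySem.Chars.splitOnMax.go [':'] fuel 0 l cur acc
      = ((cur.reverse ++ l) :: acc).reverse := by
  cases fuel with
  | zero => rw [PySem.Chars.splitOnMax.go.eq_def]
  | succ n =>
    cases l with
    | nil => rw [PySem.Chars.splitOnMax.go.eq_def]; simp
    | cons c rest => rw [PySem.Chars.splitOnMax.go.eq_def]; simp

theorem pv_splitOnMax_go (l : List Char) :
    ∀ (cur : List Char) (acc : List (List Char)) (fuel : Nat), l.length < fuel →
    PySem.Chars.splitOnMax.go [':'] fuel 1 l cur acc
      = acc.reverse ++
        (if ':' ∈ l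
         then [cur.reverse ++ l.takeWhile (fun c => c ≠ ':'), (l.dropWhile (fun c => c ≠ ':')).tail]
         else [cur.reverse ++ l]) := by
  induction l with
  | nil =>
    intro cur acc fuel hf
    cases fuel with
    | zero => omega
    | succ n => rw [PySem.Chars.splitOnMax.go.eq_def]; simp
  | cons c rest ih =>
    intro cur acc fuel hf
    cases fuel with
    | zero => simp at hf
    | succ n =>
      have hn : rest.length < n := by simpa using hf
      rw [PySem.Chars.splitOnMax.go.eq_def]
      by_cases hc : c = ':'
      · subst hc
        simp only [List.isPrefixOf, BEq.rfl, Bool.and_true]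
        simp [pv_sm_go_m0]
      · simp only [List.isPrefixOf, Bool.and_true]
        have : ((':' == c) : Bool) = false := by simp [Ne.symm hc]
        simp only [this, Bool.false_eq_true, if_false, Nat.succ_ne_zero]
        rw [ih (c :: cur) acc n hn]
        have hmem : (':' = c ∨ ':' ∈ rest) ↔ ':' ∈ rest :=
          or_iff_right (fun h => hc h.symm)
        simp only [List.takeWhile_cons, List.dropWhile_cons, List.reverse_cons,
          List.mem_cons, hmem]
        by_cases hr : ':' ∈ rest <;>
          simp [hr, hc, List.append_assoc]

theorem pv_strip_id (t : List Char) (h : ∀ ch ∈ t, PySem.Chars.isspace ch = false) :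
    PySem.Chars.strip t = t := by
  have hls : ∀ (u : List Char), (∀ ch ∈ u, PySem.Chars.isspace ch = false) →
      PySem.Chars.lstrip u = u := by
    intro u hu
    cases u with
    | nil => rfl
    | cons c cs =>
      rw [PySem.Chars.lstrip, List.dropWhile_cons_of_neg]
      simp [hu c (by simp)]
  have h2 : List.dropWhile PySem.Chars.isspace t.reverse = t.reverse := by
    simpa [PySem.Chars.lstrip] using hls t.reverse (fun ch hch => h ch (List.mem_reverse.mp hch))
  rw [PySem.Chars.strip, hls t h, PySem.Chars.rstrip, h2, List.reverse_reverse]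

theorem pv_part_eq (t : List Char) (hsp : ∀ ch ∈ t, PySem.Chars.isspace ch = false) :
    pvFixPartA (String.ofList t) = pvQuoteB (String.ofList t) := by
  by_cases hmem : ':' ∈ t
  · have hin : PySem.Str.isIn ":" (String.ofList t) = true := by
      rw [PySem.Str.isIn_iff_infix]
      simpa using (List.singleton_infix_iff ':' t).mpr hmem
    have hsm : PySem.Chars.splitOnMax t [':'] 1
        = [t.takeWhile (fun c => c ≠ ':'), (t.dropWhile (fun c => c ≠ ':')).tail] := by
      rw [PySem.Chars.splitOnMax]
      rw [if_neg (by norm_num)]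
      rw [show (1 : Int).toNat = 1 from rfl, pv_splitOnMax_go t [] [] (t.length + 1) (by omega)]
      simp [hmem]
    have hdw : t.dropWhile (fun c => c ≠ ':') ≠ [] := by
      intro hcon
      have := List.dropWhile_eq_nil_iff.mp hcon ':' hmem
      simp at this
    obtain ⟨d, tail, hd⟩ : ∃ d tail, t.dropWhile (fun c => c ≠ ':') = d :: tail := by
      cases hdwe : t.dropWhile (fun c => c ≠ ':') with
      | nil => exact absurd hdwe hdw
      | cons d tail => exact ⟨d, tail, rfl⟩
    have hkey : ∀ ch ∈ t.takeWhile (fun c => c ≠ ':'), PySem.Chars.isspace ch = false :=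
      fun ch hch => hsp ch ((List.takeWhile_sublist _).subset hch)
    have hval : ∀ ch ∈ tail, PySem.Chars.isspace ch = false := by
      intro ch hch
      exact hsp ch ((List.dropWhile_sublist _).subset (hd ▸ List.mem_cons_of_mem d hch))
    rw [pvFixPartA, if_pos hin, pvQuoteB]
    simp only [PySem.Str.splitMax?, String.toList_ofList, PySem.Chars.splitMax?]
    rw [show (":".toList) = [':'] from rfl, if_neg (by simp), hsm]
    simp only [Option.map_some, Option.getD_some, List.map_cons, List.map_nil]
    simp only [PySem.List.pyGetD_zero_cons]
    rw [show ∀ (a b : String), PySem.List.pyGetD [a, b] 1 "" = b from fun a b => by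
      simp [PySem.List.pyGetD, PySem.List.pyGet?, PySem.List.pyIdx?]]
    simp only [PySem.Str.strip, String.toList_ofList, hd, List.tail_cons,
      pv_strip_id _ hkey, pv_strip_id tail hval]
  · have hin : PySem.Str.isIn ":" (String.ofList t) = false := by
      rw [← Bool.not_eq_true, PySem.Str.isIn_iff_infix]
      simpa using fun h => hmem ((List.singleton_infix_iff ':' t).mp h)
    have hdw : t.dropWhile (fun c => c ≠ ':') = [] := by
      rw [List.dropWhile_eq_nil_iff]
      intro x hx
      have hxne : x ≠ ':' := fun he => hmem (he ▸ hx)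
      simp [hxne]
    rw [pvFixPartA, if_neg (by rw [hin]; simp), pvQuoteB]
    simp only [String.toList_ofList, hdw]

-- ===== VERDICT (by name: the statement is the Claim_ definition above) =====
set_option maxHeartbeats 1000000 in
theorem fix_json_string_spec : Claim_equal_fix_json_string := by
  intro data _
  unfold Spec_fix_json_string
  simp only [fix_json_string, fix_json_string_alt]
  have hcs : (PySem.Str.replace (PySem.Str.replace (PySem.Str.replace (PySem.Str.replace data "{" "{ ") "}" " }") "[" "[ ") "]" " ]").toList
      = data.toList.flatMap pvExp := by
    simp only [PySem.Str.toList_replace, String.reduceToList]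
    exact pv_chain data.toList
  have hA : PySem.Str.split₀ (PySem.Str.replace (PySem.Str.replace (PySem.Str.replace (PySem.Str.replace data "{" "{ ") "}" " }") "[" "[ ") "]" " ]")
      = (PySem.Chars.split₀ (data.toList.flatMap pvExp)).map String.ofList := by
    rw [PySem.Str.split₀, hcs]
  have hTok : PySem.Chars.split₀ (data.toList.flatMap pvExp)
      = pvFinC (data.toList.foldl pvStepC ([], [])) := by
    rw [PySem.Chars.split₀]
    simpa using pv_split_go data.toList [] []
  have hB : data.toList.foldl pvStepB ([], [])
      = ((data.toList.foldl pvStepC ([], [])).1.map String.ofList,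
         (data.toList.foldl pvStepC ([], [])).2) := by
    simpa using pv_stepB_stepC data.toList [] []
  have hprops : ∀ u ∈ pvFinC (data.toList.foldl pvStepC ([], [])),
      u ≠ [] ∧ ∀ ch ∈ u, PySem.Chars.isspace ch = false := by
    rw [← hTok, PySem.Chars.split₀]
    exact pv_split_tokens _ [] [] (by simp) (by simp)
  rw [hA, hTok, hB]
  have htoks : (if ((data.toList.foldl pvStepC ([], [])).2).isEmpty
        then (data.toList.foldl pvStepC ([], [])).1.map String.ofList
        else (data.toList.foldl pvStepC ([], [])).1.map String.ofList
          ++ [String.ofList (data.toList.foldl pvStepC ([], [])).2])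
      = (pvFinC (data.toList.foldl pvStepC ([], []))).map String.ofList := by
    rw [pvFinC]
    by_cases h : ((data.toList.foldl pvStepC ([], [])).2).isEmpty <;> simp [h]
  have htoks2 : (if ((data.toList.foldl pvStepC ([], [])).1.map String.ofList,
        (data.toList.foldl pvStepC ([], [])).2).2.isEmpty
      then ((data.toList.foldl pvStepC ([], [])).1.map String.ofList,
        (data.toList.foldl pvStepC ([], [])).2).1
      else ((data.toList.foldl pvStepC ([], [])).1.map String.ofList,
        (data.toList.foldl pvStepC ([], [])).2).1
          ++ [String.ofList ((data.toList.foldl pvStepC ([], [])).1.map String.ofList,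
              (data.toList.foldl pvStepC ([], [])).2).2])
      = (pvFinC (data.toList.foldl pvStepC ([], []))).map String.ofList := by
    rw [pvFinC]
    by_cases h : ((data.toList.foldl pvStepC ([], [])).2).isEmpty <;> simp [h]
  rw [htoks2, PySem.List.foldl_append_singleton_eq_map, PySem.List.foldl_append_singleton_eq_map]
  simp only [List.nil_append, List.map_map]
  refine congrArg (PySem.Str.join " ") ?_
  refine List.map_congr_left ?_
  intro u hu
  exact pv_part_eq u (hprops u hu).2
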